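-- pv_equiv track=rewrite | github.com/mattgodbolt/xmos | beebasm-fmt.py | _split_colon_stmts
-- ===== SOURCE A (Python) =====
-- def _split_colon_stmts(code):
--     """Split code on : separators, respecting strings."""
--     parts = []
--     current = []
--     in_string = False
--     string_char = None
--     for ch in code:
--         if in_string:
--             current.append(ch)
--             if ch == string_char:
--                 in_string = False
--             continue
--         if ch in ('"', "'"):
--             in_string = True
--             string_char = ch
--             current.append(ch)
--             continue
--         if ch == ':':
--             part = ''.join(current).strip()
--             if part:
--                 parts.append(part)
--             current = []
--             continue
--         current.append(ch)
--     part = ''.join(current).strip()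
--     if part:
--         parts.append(part)
--     return parts if parts else [code]
-- ===== SOURCE B (Python) =====
-- def _split_colon_stmts(code):
--     """Split code on : separators, respecting strings."""
--     n = len(code)
--     cols = []
--     i = 0
--     while i < n:
--         ch = code[i]
--         if ch == '"' or ch == "'":
--             j = code.find(ch, i + 1)
--             i = n if j == -1 else j + 1
--         elif ch == ':':
--             cols.append(i)
--             i += 1
--         else:
--             i += 1
--     parts = []
--     prev = 0
--     for p in cols:
--         seg = code[prev:p].strip()
--         if seg:
--             parts.append(seg)
--         prev = p + 1
--     seg = code[prev:].strip()
--     if seg: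
--         parts.append(seg)
--     return parts if parts else [code]
-- ===== Notes on version B (the rewrite author's own statement) =====
-- stated objective: alternative
-- what changed: Replaces A's per-character in-string state machine with accumulated current/parts buffers by an index scan that skips string literals as whole blocks via str.find and records colon positions, then builds the parts by slicing, stripping and filtering afterwards.
import Mathlib
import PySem

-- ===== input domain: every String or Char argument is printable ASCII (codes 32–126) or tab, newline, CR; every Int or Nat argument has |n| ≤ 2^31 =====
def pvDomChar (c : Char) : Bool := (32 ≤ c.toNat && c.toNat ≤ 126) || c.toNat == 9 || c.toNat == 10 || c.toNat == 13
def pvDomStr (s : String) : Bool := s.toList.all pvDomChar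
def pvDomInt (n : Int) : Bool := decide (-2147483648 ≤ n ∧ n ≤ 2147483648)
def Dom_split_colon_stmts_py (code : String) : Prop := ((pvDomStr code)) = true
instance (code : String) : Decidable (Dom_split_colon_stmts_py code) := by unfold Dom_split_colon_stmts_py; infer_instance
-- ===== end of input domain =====

-- B replaces A's per-character in-string state machine by an index scan that skips string
-- literals as whole blocks via str.find and records colon positions, slicing afterwards
-- (objective: alternative decomposition, same O(n) cost).

-- ===== PORT A =====
-- A's loop: parts/current accumulators, in_string flag, string_char; strings as List Char,
-- joined/stripped exactly where A joins/strips (''.join is the identity on the char list).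
def pvLoopA (cs : List Char) (parts : List (List Char)) (cur : List Char)
    (ins : Bool) (sc : Option Char) : List (List Char) :=
  match cs with
  | [] =>
      let part := PySem.Chars.strip cur
      if part = [] then parts else parts ++ [part]
  | ch :: rest =>
      if ins then
        pvLoopA rest parts (cur ++ [ch]) (if some ch = sc then false else true) sc
      else if ch = '"' ∨ ch = '\'' then
        pvLoopA rest parts (cur ++ [ch]) true (some ch)
      else if ch = ':' then
        let part := PySem.Chars.strip cur
        pvLoopA rest (if part = [] then parts else parts ++ [part]) [] false sc
      else
        pvLoopA rest parts (cur ++ [ch]) false sc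

def split_colon_stmts_py (code : String) : List String :=
  let parts := pvLoopA code.toList [] [] false none
  if parts = [] then [code] else parts.map String.mk

-- ===== PORT B =====
-- B's first phase: while i < n, skip string literals via code.find(ch, i+1), record colon
-- positions (cols is the accumulated list, exactly Source B's).
def pvScanB (cs : List Char) (i : Nat) (cols : List Nat) : List Nat :=
  if h : i < cs.length then
    let ch := cs[i]
    if ch = '"' ∨ ch = '\'' then
      let j := PySem.Chars.findFrom cs [ch] ((i + 1 : Nat) : Int)
      let i' := if j = -1 then cs.length else j.toNat + 1
      pvScanB cs i' cols
    else if ch = ':' then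
      pvScanB cs (i + 1) (cols ++ [i])
    else
      pvScanB cs (i + 1) cols
  else cols
termination_by cs.length - i
decreasing_by
  · split
    · omega
    · rename_i he
      have hs := (PySem.Chars.findFrom_natCast_spec cs [cs[i]] (i + 1) (by omega) he).1
      omega
  · omega
  · omega

-- B's second phase: fold over cols with prev and the parts accumulator; the final
-- code[prev:] segment is handled when cols is exhausted, exactly as after Source B's loop.
-- code[prev:p] is ported as (cs.drop prev).take (p - prev): exact for the 0 ≤ prev, p
-- arising here (Python and take/drop clamp identically for slices with nonnegative bounds).
def pvBuildB (cs : List Char) (prev : Nat) (parts : List (List Char)) :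
    List Nat → List (List Char)
  | [] =>
      let seg := PySem.Chars.strip (cs.drop prev)
      if seg = [] then parts else parts ++ [seg]
  | p :: ps =>
      let seg := PySem.Chars.strip ((cs.drop prev).take (p - prev))
      pvBuildB cs (p + 1) (if seg = [] then parts else parts ++ [seg]) ps

def split_colon_stmts_py_alt (code : String) : List String :=
  let cs := code.toList
  let cols := pvScanB cs 0 []
  let parts := pvBuildB cs 0 [] cols
  if parts = [] then [code] else parts.map String.mk

-- ===== PRECONDITION & SPEC =====
def Spec_split_colon_stmts_py (code : String) (out : List String) : Prop := out = split_colon_stmts_py_alt code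
instance (code : String) (out : List String) : Decidable (Spec_split_colon_stmts_py code out) := by unfold Spec_split_colon_stmts_py; infer_instance

-- ===== CLAIM (what is proved, stated in full; the proofs are below) =====
def Claim_equal_split_colon_stmts_py : Prop := ∀ (code : String), Dom_split_colon_stmts_py code → Spec_split_colon_stmts_py code (split_colon_stmts_py code)

-- ===== LEMMAS AND PROOFS =====

-- split a list at the first occurrence of q: (prefix through q, remainder)
def pvSkip (q : Char) : List Char → List Char × List Char
  | [] => ([], [])
  | x :: xs => if x = q then ([x], xs) else
      let r := pvSkip q xs
      (x :: r.1, r.2)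

lemma pvSkip_len (q : Char) (l : List Char) : (pvSkip q l).2.length ≤ l.length := by
  induction l with
  | nil => simp [pvSkip]
  | cons x xs ih =>
      by_cases h : x = q
      · simp [pvSkip, h]
      · simp only [pvSkip, if_neg h]; simpa using Nat.le_succ_of_le ih

-- the raw (unstripped) segments of cs given a pending segment acc
def pvRawSegs (acc : List Char) (cs : List Char) : List (List Char) :=
  match cs with
  | [] => [acc]
  | ch :: rest =>
      if ch = '"' ∨ ch = '\'' then
        pvRawSegs (acc ++ ch :: (pvSkip ch rest).1) (pvSkip ch rest).2
      else if ch = ':' then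
        acc :: pvRawSegs [] rest
      else
        pvRawSegs (acc ++ [ch]) rest
termination_by cs.length
decreasing_by
  · have := pvSkip_len ch rest; simpa using Nat.lt_succ_of_le this
  · simp
  · simp

lemma pvRawSegs_nil (acc : List Char) : pvRawSegs acc [] = [acc] := by
  rw [pvRawSegs]

lemma pvRawSegs_quote (acc : List Char) (ch : Char) (rest : List Char)
    (hq : ch = '"' ∨ ch = '\'') :
    pvRawSegs acc (ch :: rest) =
      pvRawSegs (acc ++ ch :: (pvSkip ch rest).1) (pvSkip ch rest).2 := by
  rw [pvRawSegs]; simp [hq]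

lemma pvRawSegs_colon (acc : List Char) (rest : List Char) :
    pvRawSegs acc (':' :: rest) = acc :: pvRawSegs [] rest := by
  rw [pvRawSegs]; simp

lemma pvRawSegs_other (acc : List Char) (ch : Char) (rest : List Char)
    (hq : ¬(ch = '"' ∨ ch = '\'')) (hc : ch ≠ ':') :
    pvRawSegs acc (ch :: rest) = pvRawSegs (acc ++ [ch]) rest := by
  rw [pvRawSegs]; simp [hq, hc]

def pvStripFilter (l : List (List Char)) : List (List Char) :=
  (l.map PySem.Chars.strip).filter (· ≠ [])

-- segments of cs from index i delimited by the positions ps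
def pvSegsOf (cs : List Char) (i : Nat) : List Nat → List (List Char)
  | [] => [cs.drop i]
  | p :: ps => ((cs.drop i).take (p - i)) :: pvSegsOf cs (p + 1) ps

def pvConsHead (acc : List Char) : List (List Char) → List (List Char)
  | [] => [acc]
  | h :: t => (acc ++ h) :: t

lemma pvSegsOf_nil (cs : List Char) (i : Nat) : pvSegsOf cs i [] = [cs.drop i] := rfl

lemma pvSegsOf_cons (cs : List Char) (i p : Nat) (ps : List Nat) :
    pvSegsOf cs i (p :: ps) = ((cs.drop i).take (p - i)) :: pvSegsOf cs (p + 1) ps := rfl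

lemma pvConsHead_cons (acc h : List Char) (t : List (List Char)) :
    pvConsHead acc (h :: t) = (acc ++ h) :: t := rfl

lemma pvSingleton_prefix_iff (q : Char) (t : List Char) : [q] <+: t ↔ t.head? = some q := by
  constructor
  · rintro ⟨r, rfl⟩; rfl
  · intro h; cases t with
    | nil => simp at h
    | cons a b => simp at h; subst h; exact ⟨b, rfl⟩

lemma pvSkip_not_mem (q : Char) (l : List Char) (h : q ∉ l) : pvSkip q l = (l, []) := by
  induction l with
  | nil => simp [pvSkip]
  | cons x xs ih =>
      simp at h
      simp [pvSkip, Ne.symm h.1, ih h.2]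

lemma pvSkip_first (q : Char) (l : List Char) (j : Nat)
    (hj : l[j]? = some q) (hmin : ∀ m < j, l[m]? ≠ some q) :
    pvSkip q l = (l.take (j + 1), l.drop (j + 1)) := by
  induction l generalizing j with
  | nil => simp at hj
  | cons x xs ih =>
      by_cases hx : x = q
      · have hj0 : j = 0 := by
          by_contra h0
          exact hmin 0 (by omega) (by simp [hx])
        subst hj0; simp [pvSkip, hx]
      · have hj0 : j ≠ 0 := by
          intro h0; subst h0; simp at hj; exact hx hj
        obtain ⟨j', rfl⟩ := Nat.exists_eq_succ_of_ne_zero hj0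
        have := ih j' (by simpa using hj)
          (fun m hm => by have := hmin (m + 1) (by omega); simpa using this)
        simp [pvSkip, hx, this]

-- ---- A-side characterisation ----

lemma pvLoopA_string (q : Char) (l : List Char) :
    ∀ parts cur, pvLoopA l parts cur true (some q) =
      pvLoopA (pvSkip q l).2 parts (cur ++ (pvSkip q l).1) false (some q) := by
  induction l with
  | nil => intro parts cur; simp [pvSkip]; rfl
  | cons x xs ih =>
      intro parts cur
      by_cases hx : x = q
      · subst hx; simp [pvLoopA, pvSkip]
      · have hne : (some x = some q) = False := by simp [hx]
        simp [pvLoopA, pvSkip, hx, hne, ih]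

lemma pvStripFilter_cons (a : List Char) (t : List (List Char)) :
    pvStripFilter (a :: t) =
      (if PySem.Chars.strip a = [] then [] else [PySem.Chars.strip a]) ++ pvStripFilter t := by
  by_cases h : PySem.Chars.strip a = [] <;> simp [pvStripFilter, h]

lemma pvLoopA_char_aux (n : Nat) : ∀ cs : List Char, cs.length ≤ n → ∀ parts cur sc,
    pvLoopA cs parts cur false sc = parts ++ pvStripFilter (pvRawSegs cur cs) := by
  induction n with
  | zero =>
      intro cs h parts cur sc
      have : cs = [] := List.eq_nil_of_length_eq_zero (by omega)
      subst this
      rw [pvRawSegs_nil, pvStripFilter_cons]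
      by_cases hp : PySem.Chars.strip cur = [] <;> simp [pvLoopA, pvStripFilter, hp]
  | succ n ih =>
      intro cs h parts cur sc
      match cs with
      | [] =>
          rw [pvRawSegs_nil, pvStripFilter_cons]
          by_cases hp : PySem.Chars.strip cur = [] <;> simp [pvLoopA, pvStripFilter, hp]
      | ch :: rest =>
          by_cases hq : ch = '"' ∨ ch = '\''
          · have h1 : pvLoopA (ch :: rest) parts cur false sc
                = pvLoopA rest parts (cur ++ [ch]) true (some ch) := by
              rcases hq with hq | hq <;> subst hq <;> simp [pvLoopA]
            rw [h1, pvLoopA_string, pvRawSegs_quote _ _ _ hq,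
              ih _ (le_trans (pvSkip_len ch rest) (by simpa using Nat.lt_succ_iff.mp (by simpa using h)))]
            simp
          · by_cases hc : ch = ':'
            · subst hc
              have h1 : pvLoopA (':' :: rest) parts cur false sc
                  = pvLoopA rest (if PySem.Chars.strip cur = [] then parts
                      else parts ++ [PySem.Chars.strip cur]) [] false sc := by
                simp [pvLoopA]
              rw [h1, pvRawSegs_colon, pvStripFilter_cons,
                ih rest (by simpa using Nat.lt_succ_iff.mp (by simpa using h))]
              by_cases hp : PySem.Chars.strip cur = [] <;> simp [hp]
            · have h1 : pvLoopA (ch :: rest) parts cur false sc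
                  = pvLoopA rest parts (cur ++ [ch]) false sc := by
                simp [pvLoopA, hq, hc]
              rw [h1, pvRawSegs_other _ _ _ hq hc,
                ih rest (by simpa using Nat.lt_succ_iff.mp (by simpa using h))]

lemma pvLoopA_char (cs : List Char) (parts : List (List Char)) (cur : List Char) (sc : Option Char) :
    pvLoopA cs parts cur false sc = parts ++ pvStripFilter (pvRawSegs cur cs) :=
  pvLoopA_char_aux cs.length cs le_rfl parts cur sc

-- ---- B-side characterisation ----

lemma pvScanB_stop (cs : List Char) (i : Nat) (cols : List Nat) (h : ¬ i < cs.length) :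
    pvScanB cs i cols = cols := by
  rw [pvScanB]; simp [h]

lemma pvScanB_quote (cs : List Char) (i : Nat) (cols : List Nat) (h : i < cs.length)
    (hq : cs[i] = '"' ∨ cs[i] = '\'') :
    pvScanB cs i cols = pvScanB cs
      (if PySem.Chars.findFrom cs [cs[i]] ((i + 1 : Nat) : Int) = -1 then cs.length
       else (PySem.Chars.findFrom cs [cs[i]] ((i + 1 : Nat) : Int)).toNat + 1) cols := by
  rw [pvScanB]; simp [h, hq]

lemma pvScanB_colon (cs : List Char) (i : Nat) (cols : List Nat) (h : i < cs.length)
    (hc : cs[i] = ':') :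
    pvScanB cs i cols = pvScanB cs (i + 1) (cols ++ [i]) := by
  rw [pvScanB]; simp [h, hc]

lemma pvScanB_other (cs : List Char) (i : Nat) (cols : List Nat) (h : i < cs.length)
    (hq : ¬(cs[i] = '"' ∨ cs[i] = '\'')) (hc : cs[i] ≠ ':') :
    pvScanB cs i cols = pvScanB cs (i + 1) cols := by
  rw [pvScanB]; simp [h, hq, hc]

lemma pvScanB_acc (cs : List Char) (k : Nat) :
    ∀ i cols, cs.length - i ≤ k → pvScanB cs i cols = cols ++ pvScanB cs i [] := by
  induction k with
  | zero =>
      intro i cols hk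
      rw [pvScanB_stop _ _ _ (by omega), pvScanB_stop _ _ _ (by omega)]; simp
  | succ k ih =>
      intro i cols hk
      by_cases h : i < cs.length
      · by_cases hq : cs[i] = '"' ∨ cs[i] = '\''
        · rw [pvScanB_quote _ _ _ h hq, pvScanB_quote _ _ [] h hq]
          by_cases he : PySem.Chars.findFrom cs [cs[i]] ((i + 1 : Nat) : Int) = -1
          · rw [if_pos he, ih _ _ (by omega)]
          · have hs := (PySem.Chars.findFrom_natCast_spec cs [cs[i]] (i + 1) (by omega) he).1
            rw [if_neg he, ih _ _ (by omega)]
        · by_cases hc : cs[i] = ':'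
          · rw [pvScanB_colon _ _ _ h hc, pvScanB_colon _ _ [] h hc]
            simp only [List.nil_append]
            rw [ih _ _ (by omega), ih (i + 1) [i] (by omega)]
            simp
          · rw [pvScanB_other _ _ _ h hq hc, pvScanB_other _ _ [] h hq hc,
              ih _ _ (by omega)]
      · rw [pvScanB_stop _ _ _ h, pvScanB_stop _ _ _ h]; simp

lemma pvScanB_ge (cs : List Char) (k : Nat) :
    ∀ i, cs.length - i ≤ k → ∀ p ∈ pvScanB cs i [], i ≤ p := by
  induction k with
  | zero =>
      intro i hk p hp
      rw [pvScanB_stop _ _ _ (by omega)] at hp; simp at hp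
  | succ k ih =>
      intro i hk p hp
      by_cases h : i < cs.length
      · by_cases hq : cs[i] = '"' ∨ cs[i] = '\''
        · rw [pvScanB_quote _ _ [] h hq] at hp
          by_cases he : PySem.Chars.findFrom cs [cs[i]] ((i + 1 : Nat) : Int) = -1
          · rw [if_pos he] at hp
            have := ih cs.length (by omega) p hp; omega
          · have hs := (PySem.Chars.findFrom_natCast_spec cs [cs[i]] (i + 1) (by omega) he).1
            rw [if_neg he] at hp
            have := ih _ (by omega) p hp; omega
        · by_cases hc : cs[i] = ':'
          · rw [pvScanB_colon _ _ [] h hc] at hp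
            simp only [List.nil_append] at hp
            rw [pvScanB_acc cs cs.length _ _ (by omega)] at hp
            simp at hp
            rcases hp with hp | hp
            · omega
            · have := ih (i + 1) (by omega) p hp; omega
          · rw [pvScanB_other _ _ [] h hq hc] at hp
            have := ih (i + 1) (by omega) p hp; omega
      · rw [pvScanB_stop _ _ _ h] at hp; simp at hp

lemma pvSegsOf_ne_nil (cs : List Char) (i : Nat) (ps : List Nat) :
    pvSegsOf cs i ps ≠ [] := by
  cases ps <;> simp [pvSegsOf]

lemma pvConsHead_nil (l : List (List Char)) (h : l ≠ []) : pvConsHead [] l = l := by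
  cases l with
  | nil => exact absurd rfl h
  | cons a t => simp [pvConsHead]

-- merging a block of cs[i:i') into the head segment of the segments from i'
lemma pvConsHead_merge (cs : List Char) (i i' : Nat) (ps : List Nat)
    (hii : i ≤ i') (hps : ∀ p ∈ ps, i' ≤ p) (acc : List Char) :
    pvConsHead (acc ++ (cs.drop i).take (i' - i)) (pvSegsOf cs i' ps)
      = pvConsHead acc (pvSegsOf cs i ps) := by
  cases ps with
  | nil =>
      rw [pvSegsOf_nil, pvSegsOf_nil, pvConsHead_cons, pvConsHead_cons]
      have hd : (cs.drop i).drop (i' - i) = cs.drop i' := by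
        rw [List.drop_drop]; congr 1; omega
      rw [List.append_assoc, ← hd, List.take_append_drop]
  | cons p t =>
      have hp : i' ≤ p := hps p (by simp)
      rw [pvSegsOf_cons, pvSegsOf_cons, pvConsHead_cons, pvConsHead_cons]
      have hd : (cs.drop i).drop (i' - i) = cs.drop i' := by
        rw [List.drop_drop]; congr 1; omega
      have : (cs.drop i).take (p - i)
          = (cs.drop i).take (i' - i) ++ (cs.drop i').take (p - i') := by
        rw [← hd, ← List.take_add]; congr 1; omega
      rw [this, List.append_assoc]

lemma pvMain (cs : List Char) (k : Nat) :
    ∀ i, cs.length - i ≤ k → i ≤ cs.length → ∀ acc,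
      pvRawSegs acc (cs.drop i) = pvConsHead acc (pvSegsOf cs i (pvScanB cs i [])) := by
  induction k with
  | zero =>
      intro i hk hi acc
      have hd : List.drop i cs = [] := by rw [List.drop_eq_nil_iff]; omega
      rw [pvScanB_stop _ _ _ (by omega), hd, pvRawSegs_nil, pvSegsOf_nil, hd,
        pvConsHead_cons, List.append_nil]
  | succ k ih =>
      intro i hk hi acc
      by_cases h : i < cs.length
      · have hcons := List.drop_eq_getElem_cons h
        by_cases hq : cs[i] = '"' ∨ cs[i] = '\''
        · rw [hcons, pvRawSegs_quote _ _ _ hq, pvScanB_quote _ _ [] h hq]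
          by_cases he : PySem.Chars.findFrom cs [cs[i]] ((i + 1 : Nat) : Int) = -1
          · -- unterminated string: it runs to the end of code
            have hf : PySem.Chars.find (List.drop (i + 1) cs) [cs[i]] = -1 := by
              rw [PySem.Chars.findFrom_natCast cs [cs[i]] (i + 1) (by omega)] at he
              by_cases hf0 : PySem.Chars.find (List.drop (i + 1) cs) [cs[i]] = -1
              · exact hf0
              · rw [if_neg hf0] at he
                have := PySem.Chars.neg_one_le_find (List.drop (i + 1) cs) [cs[i]]
                omega
            have hnm : cs[i] ∉ cs.drop (i + 1) := by
              rw [PySem.Chars.find_eq_neg_one_iff] at hf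
              intro hm; exact hf ((List.singleton_infix_iff _ _).mpr hm)
            rw [if_pos he, pvSkip_not_mem _ _ hnm, pvScanB_stop _ _ _ (by omega),
              pvRawSegs_nil, pvSegsOf_nil, hcons, pvConsHead_cons]
          · -- the closing quote is at index i+1+f in cs
            have hfr := PySem.Chars.findFrom_natCast cs [cs[i]] (i + 1) (by omega)
            have hf0 : PySem.Chars.find (List.drop (i + 1) cs) [cs[i]] ≠ -1 := by
              intro hc0; rw [hfr, if_pos hc0] at he; exact he rfl
            have hfpos : 0 ≤ PySem.Chars.find (List.drop (i + 1) cs) [cs[i]] := by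
              have := PySem.Chars.neg_one_le_find (List.drop (i + 1) cs) [cs[i]]
              omega
            set f := PySem.Chars.find (List.drop (i + 1) cs) [cs[i]] with hfdef
            have hspec := PySem.Chars.find_spec hfpos
            have hq1 : (List.drop (i + 1) cs)[f.toNat]? = some cs[i] := by
              have := hspec.1
              rw [pvSingleton_prefix_iff, List.head?_drop] at this
              exact this
            have hmin : ∀ m < f.toNat, (List.drop (i + 1) cs)[m]? ≠ some cs[i] := by
              intro m hm hcm
              exact hspec.2 m hm ((pvSingleton_prefix_iff _ _).mpr
                (by rw [List.head?_drop]; exact hcm))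
            have hflen : f.toNat < (List.drop (i + 1) cs).length :=
              (List.getElem?_eq_some_iff.mp hq1).1
            have hsk := pvSkip_first cs[i] (List.drop (i + 1) cs) f.toNat hq1 hmin
            have hjv : (PySem.Chars.findFrom cs [cs[i]] ((i + 1 : Nat) : Int)).toNat + 1
                = i + 1 + (f.toNat + 1) := by
              rw [hfr, if_neg hf0]; omega
            rw [if_neg he, hjv, hsk]
            have hdd : (List.drop (i + 1) cs).drop (f.toNat + 1)
                = cs.drop (i + 1 + (f.toNat + 1)) := by
              rw [List.drop_drop]
            have hlen2 : i + 1 + (f.toNat + 1) ≤ cs.length := by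
              simp only [List.length_drop] at hflen; omega
            rw [hdd, ih _ (by omega) hlen2]
            have hblk : acc ++ cs[i] :: (List.drop (i + 1) cs).take (f.toNat + 1)
                = acc ++ (cs.drop i).take (i + 1 + (f.toNat + 1) - i) := by
              rw [hcons]
              have : i + 1 + (f.toNat + 1) - i = (f.toNat + 1) + 1 := by omega
              rw [this, List.take_succ_cons]
            rw [hblk, pvConsHead_merge cs i _ _ (by omega)
              (pvScanB_ge cs cs.length _ (by omega))]
        · by_cases hc : cs[i] = ':'
          · rw [hcons, hc, pvRawSegs_colon, pvScanB_colon _ _ [] h hc,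
              pvScanB_acc cs cs.length _ _ (by omega), ih _ (by omega) (by omega) []]
            simp only [List.nil_append, List.singleton_append]
            rw [pvConsHead_nil _ (pvSegsOf_ne_nil _ _ _), pvSegsOf_cons,
              Nat.sub_self, List.take_zero, pvConsHead_cons, List.append_nil]
          · rw [hcons, pvRawSegs_other _ _ _ hq hc, pvScanB_other _ _ [] h hq hc,
              ih _ (by omega) (by omega)]
            have h1 : i + 1 - i = 1 := by omega
            have hblk : acc ++ [cs[i]] = acc ++ (cs.drop i).take (i + 1 - i) := by
              rw [h1, hcons, List.take_succ_cons, List.take_zero]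
            rw [hblk, pvConsHead_merge cs i (i + 1) _ (by omega)
              (pvScanB_ge cs cs.length _ (by omega))]
      · have hd : List.drop i cs = [] := by rw [List.drop_eq_nil_iff]; omega
        rw [pvScanB_stop _ _ _ (by omega), hd, pvRawSegs_nil, pvSegsOf_nil, hd,
          pvConsHead_cons, List.append_nil]

lemma pvBuild_eq (cs : List Char) :
    ∀ ps prev parts, pvBuildB cs prev parts ps = parts ++ pvStripFilter (pvSegsOf cs prev ps) := by
  intro ps
  induction ps with
  | nil => intro prev parts; by_cases h : PySem.Chars.strip (cs.drop prev) = [] <;>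
      simp [pvBuildB, pvSegsOf, pvStripFilter, h]
  | cons p t ih =>
      intro prev parts
      rw [pvBuildB, ih, pvSegsOf, pvStripFilter_cons]
      by_cases h : PySem.Chars.strip ((cs.drop prev).take (p - prev)) = [] <;> simp [h]

-- ===== VERDICT (by name: the statement is the Claim_ definition above) =====
theorem split_colon_stmts_py_spec : Claim_equal_split_colon_stmts_py := by
  intro code _
  unfold Spec_split_colon_stmts_py split_colon_stmts_py split_colon_stmts_py_alt
  have key : pvLoopA code.toList [] [] false none
      = pvBuildB code.toList 0 [] (pvScanB code.toList 0 []) := by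
    rw [pvLoopA_char, pvBuild_eq]
    have hM := pvMain code.toList code.toList.length 0 (by omega) (by omega) []
    simp only [List.drop_zero] at hM
    rw [hM, pvConsHead_nil _ (pvSegsOf_ne_nil _ _ _)]
  dsimp only
  rw [key]
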